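-- pv_equiv track=rewrite | github.com/jennvheb/paper_drift_visualization | dynamic_outlier_detection.py | put_back_in_window
-- ===== SOURCE A (Python) =====
-- def put_back_in_window(window_for_x, window, indices):
--     for v in range(len(indices)):
--         for w in range(len(window)):
--             for i in range(len(window[w].keys())):
--                 if i == v:
--                     window[w][i] = window_for_x[v] # replace the old value with the updated one
--                     break
--     return window
-- ===== SOURCE B (Python) =====
-- def put_back_in_window(window_for_x, window, indices):
--     for d in window:
--         v = 0
--         while v < len(indices) and v < len(d):
--             d[v] = window_for_x[v]
--             v += 1
--     return window
-- ===== Notes on version B (the rewrite author's own statement) =====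
-- stated objective: faster
-- what changed: Collapses A's triple loop (each v scanned against every dict and against every key position to find i==v) into a single direct walk per dict that writes d[v]=window_for_x[v] while v is a valid position; Pre_ excludes inputs where A raises IndexError (window_for_x too short) and duplicate-key association lists, which do not represent a Python dict.
import Mathlib
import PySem

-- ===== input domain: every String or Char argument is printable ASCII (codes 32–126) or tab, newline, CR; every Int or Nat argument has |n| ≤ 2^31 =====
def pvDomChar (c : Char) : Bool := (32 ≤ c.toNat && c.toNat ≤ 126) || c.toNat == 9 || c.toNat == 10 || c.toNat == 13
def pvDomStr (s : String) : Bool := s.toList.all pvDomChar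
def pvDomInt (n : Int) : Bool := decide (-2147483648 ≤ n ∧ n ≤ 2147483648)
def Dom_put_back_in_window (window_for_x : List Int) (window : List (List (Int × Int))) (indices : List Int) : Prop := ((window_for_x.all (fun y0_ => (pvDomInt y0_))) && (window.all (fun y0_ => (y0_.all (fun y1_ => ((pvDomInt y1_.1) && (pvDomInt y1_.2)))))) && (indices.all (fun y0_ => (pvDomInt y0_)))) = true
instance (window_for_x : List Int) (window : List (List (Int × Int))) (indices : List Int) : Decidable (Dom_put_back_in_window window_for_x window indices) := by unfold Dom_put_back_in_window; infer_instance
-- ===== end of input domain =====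

-- B collapses A's triple loop into one direct position walk per dict (objective: faster).
-- Both Pythons mutate the dicts of `window` in place and return the same list object; the
-- equivalence proved here is about the returned value.

-- ===== PORT A =====
-- d[k] = v on a Python dict: overwrite the first entry with key k in place, else append.
def pySetKey (d : List (Int × Int)) (k v : Int) : List (Int × Int) :=
  match d with
  | [] => [(k, v)]
  | (k', v') :: rest => if k' = k then (k', v) :: rest else (k', v') :: pySetKey rest k v

-- 'for i in range(...): if i == v: window[w][i] = xv; break'
def innerA (v xv : Int) (is_ : List Int) (d : List (Int × Int)) : List (Int × Int) :=
  match is_ with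
  | [] => d
  | i :: rest => if i = v then pySetKey d v xv else innerA v xv rest d

def put_back_in_window (window_for_x : List Int) (window : List (List (Int × Int))) (indices : List Int) : List (List (Int × Int)) :=
  (PySem.List.pyRange 0 (indices.length : Int) 1).foldl
    (fun ws v => ws.map (fun d =>
      innerA v (PySem.List.pyGetD window_for_x v 0)
        (PySem.List.pyRange 0 (((d.map Prod.fst).length : Int)) 1) d))
    window

-- ===== PORT B =====
-- 'v = 0; while v < len(indices) and v < len(d): d[v] = window_for_x[v]; v += 1'
-- (fuel = len(indices) - v, which bounds the remaining iterations)
def bGo (window_for_x : List Int) : Nat → Int → List (Int × Int) → List (Int × Int)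
  | 0, _, d => d
  | fuel + 1, v, d =>
    if v < (d.length : Int) then
      bGo window_for_x fuel (v + 1) (pySetKey d v (PySem.List.pyGetD window_for_x v 0))
    else d

def put_back_in_window_alt (window_for_x : List Int) (window : List (List (Int × Int))) (indices : List Int) : List (List (Int × Int)) :=
  window.map (bGo window_for_x indices.length 0)

-- ===== PRECONDITION & SPEC =====
-- closed form of how many leading positions 0,1,… the Python loop ends up writing into a dict
def keyCap (V : Nat) (d : List (Int × Int)) : Nat :=
  match d.map Prod.fst with
  | [] => 0
  | k0 :: rest =>
    if (k0 :: rest).all (fun z => decide (0 ≤ z)) then min V ((rest.foldl max k0).toNat + 1)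
    else V

-- Pre_ excludes (a) inputs where A raises IndexError (window_for_x shorter than the number of
-- positions the loop writes into some dict), and (b) association lists with duplicate keys, which
-- do not represent a Python dict and are unreachable from Python.
def Pre_put_back_in_window (window_for_x : List Int) (window : List (List (Int × Int))) (indices : List Int) : Prop :=
  ∀ d ∈ window, (d.map Prod.fst).Nodup ∧ keyCap indices.length d ≤ window_for_x.length
instance (window_for_x : List Int) (window : List (List (Int × Int))) (indices : List Int) : Decidable (Pre_put_back_in_window window_for_x window indices) := by unfold Pre_put_back_in_window; infer_instance

def pvWitness_put_back_in_window : List Int × (List (List (Int × Int))) × List Int :=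
  ([5, 6], [[(0, 1), (3, 4)]], [7, 7])

def Spec_put_back_in_window (window_for_x : List Int) (window : List (List (Int × Int))) (indices : List Int) (out : List (List (Int × Int))) : Prop := out = put_back_in_window_alt window_for_x window indices
instance (window_for_x : List Int) (window : List (List (Int × Int))) (indices : List Int) (out : List (List (Int × Int))) : Decidable (Spec_put_back_in_window window_for_x window indices out) := by unfold Spec_put_back_in_window; infer_instance

-- ===== CLAIM (what is proved, stated in full; the proofs are below) =====
def Claim_equal_put_back_in_window : Prop := ∀ (window_for_x : List Int) (window : List (List (Int × Int))) (indices : List Int), Dom_put_back_in_window window_for_x window indices → Pre_put_back_in_window window_for_x window indices → Spec_put_back_in_window window_for_x window indices (put_back_in_window window_for_x window indices)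

-- ===== LEMMAS AND PROOFS =====

theorem innerA_eq (v xv : Int) (l : List Int) (d : List (Int × Int)) :
    innerA v xv l d = if v ∈ l then pySetKey d v xv else d := by
  induction l with
  | nil => simp [innerA]
  | cons i rest ih =>
    by_cases h : i = v
    · simp [innerA, h]
    · simp [innerA, h, ih, Ne.symm h]

theorem foldl_map_comm {α β : Type} (l : List β) (f : β → α → α) (ws : List α) :
    l.foldl (fun ws v => ws.map (f v)) ws = ws.map (fun d => l.foldl (fun d v => f v d) d) := by
  induction l generalizing ws with
  | nil => simp
  | cons a t ih =>
    simp only [List.foldl_cons, ih, List.map_map]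
    rfl

-- the A-side per-dict step, over a Nat loop counter
def stepA (x : List Int) (e : List (Int × Int)) (k : Nat) : List (Int × Int) :=
  if ((k : Int)) < ((e.length : Int)) then pySetKey e (k : Int) (PySem.List.pyGetD x (k : Int) 0) else e

theorem foldl_stepA_noop (x : List Int) (fuel k : Nat) (d : List (Int × Int))
    (h : d.length ≤ k) : (List.range' k fuel).foldl (stepA x) d = d := by
  induction fuel generalizing k with
  | zero => rfl
  | succ fuel ih =>
    rw [List.range'_succ, List.foldl_cons]
    have hnot : ¬ (((k : Int)) < ((d.length : Int))) := by exact_mod_cast not_lt.2 h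
    rw [stepA, if_neg hnot]
    exact ih (k + 1) (by omega)

theorem foldl_stepA_eq_bGo (x : List Int) (fuel k : Nat) (d : List (Int × Int)) :
    (List.range' k fuel).foldl (stepA x) d = bGo x fuel (k : Int) d := by
  induction fuel generalizing k d with
  | zero => rfl
  | succ fuel ih =>
    rw [List.range'_succ, List.foldl_cons, bGo]
    by_cases h : ((k : Int)) < ((d.length : Int))
    · rw [if_pos h, stepA, if_pos h]
      have := ih (k + 1) (pySetKey d (k : Int) (PySem.List.pyGetD x (k : Int) 0))
      rw [this]
      norm_num
    · rw [if_neg h, stepA, if_neg h]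
      exact foldl_stepA_noop x fuel (k + 1) d (by exact_mod_cast by omega : d.length ≤ k + 1)

-- ===== VERDICT (by name: the statement is the Claim_ definition above) =====
theorem put_back_in_window_spec : Claim_equal_put_back_in_window := by
  intro x window indices _ _
  unfold Spec_put_back_in_window put_back_in_window put_back_in_window_alt
  rw [foldl_map_comm]
  apply List.map_congr_left
  intro d _
  rw [PySem.List.pyRange_zero_natCast, List.foldl_map]
  have hstep : ∀ (e : List (Int × Int)) (k : Nat),
      innerA (k : Int) (PySem.List.pyGetD x (k : Int) 0)
        (PySem.List.pyRange 0 (((e.map Prod.fst).length : Int)) 1) e = stepA x e k := by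
    intro e k
    rw [innerA_eq, stepA]
    simp [PySem.List.mem_pyRange_one]
  have hb := foldl_stepA_eq_bGo x indices.length 0 d
  norm_num at hb
  rw [List.range_eq_range', ← hb]
  apply PySem.List.foldl_congr_mem
  intro e k _
  exact hstep e k
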